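-- pv_equiv track=rewrite | github.com/luciansmith/adventOfCode | Day 17 Efficient/day17_super_efficient.py | checkXStepsInf
-- ===== SOURCE A (Python) =====
-- def checkXStepsInf(xmin, xmax, triangles):
--     for x in range(xmin, xmax+1):
--         try:
--             xInit = triangles.index(x)
--             return xInit
--         except:
--             pass
--     return -1
-- ===== SOURCE B (Python) =====
-- def checkXStepsInf(xmin, xmax, triangles):
--     # Single pass to collect in-range values, then take the smallest;
--     # its first position is the answer (ties: .index returns the first).
--     vals = [v for v in triangles if xmin <= v <= xmax]
--     return triangles.index(min(vals)) if vals else -1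
-- ===== Notes on version B (the rewrite author's own statement) =====
-- stated objective: alternative
-- what changed: Instead of scanning the whole triangles list once per x in range(xmin, xmax+1), B filters the in-range values in one pass and returns the first index of their minimum; it trades A's dependence on the range width for a fixed number of passes over the list.
import Mathlib
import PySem

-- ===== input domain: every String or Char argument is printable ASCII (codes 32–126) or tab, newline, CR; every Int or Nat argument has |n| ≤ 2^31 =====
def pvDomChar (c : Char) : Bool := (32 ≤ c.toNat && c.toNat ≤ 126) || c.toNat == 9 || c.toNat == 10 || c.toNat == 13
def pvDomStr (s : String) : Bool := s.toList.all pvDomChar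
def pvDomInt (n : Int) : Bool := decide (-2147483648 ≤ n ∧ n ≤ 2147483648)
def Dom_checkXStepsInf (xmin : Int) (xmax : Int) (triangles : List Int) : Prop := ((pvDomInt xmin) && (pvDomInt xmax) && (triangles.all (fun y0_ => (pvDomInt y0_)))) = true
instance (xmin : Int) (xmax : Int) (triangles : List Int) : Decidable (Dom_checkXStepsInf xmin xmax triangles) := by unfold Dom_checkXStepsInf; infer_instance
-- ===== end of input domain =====

-- B replaces A's scan of `triangles` for every x in range(xmin, xmax+1) by filtering the
-- in-range values in one pass and returning the first index of their minimum (alternative algorithm).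


-- ===== PORT A =====
-- the for-loop over range(xmin, xmax+1) with early return on a successful .index
def goA (triangles : List Int) : List Int → Int
  | [] => -1
  | x :: rest =>
    match PySem.List.index? triangles x with
    | some i => (i : Int)
    | none => goA triangles rest

def checkXStepsInf (xmin : Int) (xmax : Int) (triangles : List Int) : Int :=
  goA triangles (PySem.List.pyRange xmin (xmax + 1) 1)

-- ===== PORT B =====
-- vals = [v for v in triangles if xmin <= v <= xmax]; triangles.index(min(vals)) if vals else -1
-- (min(vals) is always a member of triangles, so .index cannot raise; getD 0 is never the default)
def checkXStepsInf_alt (xmin : Int) (xmax : Int) (triangles : List Int) : Int :=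
  let vals := triangles.filter (fun v => decide (xmin ≤ v) && decide (v ≤ xmax))
  match PySem.List.min? vals (fun v => v) with
  | some m => ((PySem.List.index? triangles m).getD 0 : Int)
  | none => -1

-- ===== PRECONDITION & SPEC =====
def Spec_checkXStepsInf (xmin : Int) (xmax : Int) (triangles : List Int) (out : Int) : Prop := out = checkXStepsInf_alt xmin xmax triangles
instance (xmin : Int) (xmax : Int) (triangles : List Int) (out : Int) : Decidable (Spec_checkXStepsInf xmin xmax triangles out) := by unfold Spec_checkXStepsInf; infer_instance

-- ===== CLAIM (what is proved, stated in full; the proofs are below) =====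
def Claim_equal_checkXStepsInf : Prop := ∀ (xmin : Int) (xmax : Int) (triangles : List Int), Dom_checkXStepsInf xmin xmax triangles → Spec_checkXStepsInf xmin xmax triangles (checkXStepsInf xmin xmax triangles)

-- ===== LEMMAS AND PROOFS =====

-- the elements of l lying in [a, b)
def candsLt (a b : Int) (l : List Int) : List Int :=
  l.filter (fun v => decide (a ≤ v) && decide (v < b))

lemma mem_candsLt {a b v : Int} {l : List Int} :
    v ∈ candsLt a b l ↔ v ∈ l ∧ a ≤ v ∧ v < b := by
  simp [candsLt]

-- A's loop over any list: returns index? of the first hit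
lemma goA_range (l : List Int) (b : Int) :
    ∀ (n : Nat) (a : Int), (b - a).toNat = n →
      goA l (PySem.List.pyRange a b 1) =
        (match PySem.List.min? (candsLt a b l) (fun v => v) with
         | some m => ((PySem.List.index? l m).getD 0 : Int)
         | none => -1) := by
  intro n
  induction n with
  | zero =>
    intro a ha
    have hba : b ≤ a := by omega
    rw [PySem.List.pyRange_one_eq_nil hba]
    have : candsLt a b l = [] := by
      apply List.filter_eq_nil_iff.mpr
      intro v _
      simp only [Bool.and_eq_true, decide_eq_true_eq, not_and]
      intro h1 h2; omega
    rw [this]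
    simp [goA, PySem.List.min?]
  | succ n ih =>
    intro a ha
    have hab : a < b := by omega
    rw [PySem.List.pyRange_one_cons hab]
    show (match PySem.List.index? l a with
          | some i => (i : Int)
          | none => goA l (PySem.List.pyRange (a+1) b 1)) = _
    cases hidx : PySem.List.index? l a with
    | some i =>
      have hmem : a ∈ l := (PySem.List.index?_isSome_iff l a).mp (by rw [hidx]; rfl)
      have hc : a ∈ candsLt a b l := mem_candsLt.mpr ⟨hmem, le_refl a, hab⟩
      have hmin : PySem.List.min? (candsLt a b l) (fun v => v) = some a := by
        cases hm : PySem.List.min? (candsLt a b l) (fun v => v) with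
        | none =>
          have hnil := (PySem.List.min?_eq_none_iff (candsLt a b l) (fun v => v)).mp hm
          rw [hnil] at hc
          exact absurd hc (List.not_mem_nil)
        | some m =>
          have h1 : m ≤ a := PySem.List.min?_isMin hm a hc
          have h2 : a ≤ m := (mem_candsLt.mp (PySem.List.min?_mem hm)).2.1
          have : m = a := le_antisymm h1 h2
          rw [this]
      rw [hmin]
      rw [PySem.List.index?_eq_idxOf?] at hidx
      simp [hidx]
    | none =>
      have hnm : a ∉ l := (PySem.List.index?_eq_none_iff l a).mp hidx
      have hcand : candsLt a b l = candsLt (a+1) b l := by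
        apply List.filter_congr
        intro v hv
        have hva : v ≠ a := fun h => hnm (h ▸ hv)
        have hiff : (a ≤ v) ↔ (a + 1 ≤ v) := by omega
        simp [hiff]
      rw [hcand]
      exact ih (a + 1) (by omega)

-- ===== VERDICT (by name: the statement is the Claim_ definition above) =====
theorem checkXStepsInf_spec : Claim_equal_checkXStepsInf := by
  intro xmin xmax triangles _
  show checkXStepsInf xmin xmax triangles = checkXStepsInf_alt xmin xmax triangles
  have hfil : triangles.filter (fun v => decide (xmin ≤ v) && decide (v ≤ xmax)) =
      candsLt xmin (xmax + 1) triangles := by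
    unfold candsLt
    apply List.filter_congr
    intro v _
    have hiff : (v ≤ xmax) ↔ (v < xmax + 1) := by omega
    rw [decide_eq_decide.mpr hiff]
  rw [checkXStepsInf, goA_range triangles (xmax + 1) (xmax + 1 - xmin).toNat xmin rfl]
  simp only [checkXStepsInf_alt, hfil]
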